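-- pv_equiv track=rewrite | github.com/great-rain/python_algorithm | LeetCode/Binary Search.py | search
-- ===== SOURCE A (Python) =====
-- from typing import List
--
-- def search(nums: List[int], target: int) -> int:
--     l = 0
--     r = len(nums) - 1
--     while l <= r:
--         if nums[l] == target:
--             return l
--         if nums[r] == target:
--             return r
--
--         l += 1
--         r -= 1
--
--     return -1
-- ===== SOURCE B (Python) =====
-- def search(nums, target):
--     try:
--         return nums.index(target)
--     except ValueError:
--         return -1
-- ===== Notes on version B (the rewrite author's own statement) =====
-- stated objective: idiomatic
-- what changed: Replaces the inward two-pointer early-return scan with the standard-library first-occurrence lookup nums.index(target) (returning -1 on a miss); Pre_ excludes lists in which target occurs more than once, where A's choice among equal matches (nearest to either end) and B's (first occurrence) are both defensible first-vs-last-match conventions.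
-- outside the precondition, e.g. on search([0, 5, 5], 5): A returns 2, B returns 1
import Mathlib
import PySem

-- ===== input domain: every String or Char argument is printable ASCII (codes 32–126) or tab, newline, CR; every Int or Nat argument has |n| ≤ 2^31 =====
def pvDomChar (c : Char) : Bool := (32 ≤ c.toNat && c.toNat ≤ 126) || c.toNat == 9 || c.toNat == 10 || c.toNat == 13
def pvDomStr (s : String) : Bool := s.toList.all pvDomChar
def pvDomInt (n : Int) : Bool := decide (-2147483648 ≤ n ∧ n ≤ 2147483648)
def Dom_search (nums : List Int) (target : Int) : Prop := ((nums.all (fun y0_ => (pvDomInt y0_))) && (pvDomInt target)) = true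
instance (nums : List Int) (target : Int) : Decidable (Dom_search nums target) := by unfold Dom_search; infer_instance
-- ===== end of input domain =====

-- B replaces A's inward two-pointer early-return scan by the idiomatic
-- first-occurrence lookup nums.index(target), -1 on a miss; same O(n) cost.

-- ===== PORT A =====
-- the while loop of A: l and r move inward, checking nums[l] then nums[r]
def searchLoop (nums : List Int) (target : Int) (l r : Int) : Int :=
  if h : l ≤ r then
    if PySem.List.pyGet? nums l = some target then l
    else if PySem.List.pyGet? nums r = some target then r
    else searchLoop nums target (l + 1) (r - 1)
  else -1
termination_by (r - l + 1).toNat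
decreasing_by omega

def search (nums : List Int) (target : Int) : Int :=
  searchLoop nums target 0 ((nums.length : Int) - 1)

-- ===== PORT B =====
-- try: return nums.index(target) / except ValueError: return -1
def search_alt (nums : List Int) (target : Int) : Int :=
  match PySem.List.index? nums target with
  | some i => (i : Int)
  | none => -1

-- ===== PRECONDITION & SPEC =====
-- Pre_ excludes lists where target occurs more than once: there A's pick among equal
-- matches (nearest to either end, an artefact of the two-pointer scan order) and B's
-- (first occurrence) are both defensible first-vs-last-match conventions.
def Pre_search (nums : List Int) (target : Int) : Prop := nums.count target ≤ 1
instance (nums : List Int) (target : Int) : Decidable (Pre_search nums target) := by unfold Pre_search; infer_instance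

def pvWitness_search : List Int × Int := ([1, 2, 3], 2)

def Spec_search (nums : List Int) (target : Int) (out : Int) : Prop := out = search_alt nums target
instance (nums : List Int) (target : Int) (out : Int) : Decidable (Spec_search nums target out) := by unfold Spec_search; infer_instance

-- ===== CLAIM (what is proved, stated in full; the proofs are below) =====
def Claim_equal_search : Prop := ∀ (nums : List Int) (target : Int), Dom_search nums target → Pre_search nums target → Spec_search nums target (search nums target)

-- ===== LEMMAS AND PROOFS =====

-- ---- A side: recurrence of `search` under bidirectional decomposition ----

theorem searchA_nil (t : Int) : search [] t = -1 := by
  rw [search, searchLoop]; norm_num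

theorem searchA_single (a t : Int) : search [a] t = if a = t then 0 else -1 := by
  rw [search, searchLoop]
  simp only [List.length_cons, List.length_nil]
  norm_num [PySem.List.pyGet?_zero_cons]
  split_ifs with h
  · rfl
  · rw [searchLoop]; norm_num

set_option maxRecDepth 4000 in
set_option maxHeartbeats 1000000 in
theorem searchLoop_shift (xs : List Int) (a b t : Int) :
    ∀ (k : Nat) (l r : Int), (r - l + 1).toNat ≤ k → 0 ≤ l → r ≤ (xs.length : Int) - 1 →
      searchLoop (a :: (xs ++ [b])) t (l + 1) (r + 1) =
        (if searchLoop xs t l r = -1 then -1 else searchLoop xs t l r + 1) := by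
  intro k
  induction k with
  | zero =>
    intro l r hk hl hr
    have hlr : ¬ l ≤ r := by omega
    have hx : searchLoop xs t l r = -1 := by rw [searchLoop]; rw [dif_neg hlr]
    have hy : searchLoop (a :: (xs ++ [b])) t (l + 1) (r + 1) = -1 := by
      rw [searchLoop]; rw [dif_neg (show ¬ l + 1 ≤ r + 1 by omega)]
    rw [hx, hy]; norm_num
  | succ k ih =>
    intro l r hk hl hr
    by_cases hlr : l ≤ r
    · have hlen : l < (xs.length : Int) := by omega
      have hrange : r < (xs.length : Int) := by omega
      have hr0 : (0 : Int) ≤ r := by omega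
      have hgl : PySem.List.pyGet? xs l = some xs[l.toNat] :=
        PySem.List.pyGet?_eq_some_getElem _ hl hlen
      have hgr : PySem.List.pyGet? xs r = some xs[r.toNat] :=
        PySem.List.pyGet?_eq_some_getElem _ hr0 hrange
      have hlen2 : ((a :: (xs ++ [b])).length : Int) = (xs.length : Int) + 2 := by
        push_cast [List.length_cons, List.length_append, List.length_nil]; ring
      have hgl' : PySem.List.pyGet? (a :: (xs ++ [b])) (l + 1) = some xs[l.toNat] := by
        have h1 := PySem.List.pyGet?_eq_some_getElem (a :: (xs ++ [b]))
          (show (0 : Int) ≤ l + 1 by omega)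
          (show l + 1 < ((a :: (xs ++ [b])).length : Int) by omega)
        rw [h1]
        congr 1
        have h2 : (l + 1).toNat = l.toNat + 1 := by omega
        simp only [h2]
        simp only [List.getElem_cons_succ]
        exact List.getElem_append_left (by omega)
      have hgr' : PySem.List.pyGet? (a :: (xs ++ [b])) (r + 1) = some xs[r.toNat] := by
        have h1 := PySem.List.pyGet?_eq_some_getElem (a :: (xs ++ [b]))
          (show (0 : Int) ≤ r + 1 by omega)
          (show r + 1 < ((a :: (xs ++ [b])).length : Int) by omega)
        rw [h1]
        congr 1
        have h2 : (r + 1).toNat = r.toNat + 1 := by omega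
        simp only [h2]
        simp only [List.getElem_cons_succ]
        exact List.getElem_append_left (by omega)
      have hxs : searchLoop xs t l r =
          if xs[l.toNat] = t then l else if xs[r.toNat] = t then r
          else searchLoop xs t (l + 1) (r - 1) := by
        rw [searchLoop]; rw [dif_pos hlr, hgl, hgr]; simp only [Option.some.injEq]
      have hbig : searchLoop (a :: (xs ++ [b])) t (l + 1) (r + 1) =
          if xs[l.toNat] = t then l + 1 else if xs[r.toNat] = t then r + 1
          else searchLoop (a :: (xs ++ [b])) t (l + 1 + 1) (r + 1 - 1) := by
        rw [searchLoop]; rw [dif_pos (show l + 1 ≤ r + 1 by omega), hgl', hgr']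
        simp only [Option.some.injEq]
      rw [hxs, hbig]
      by_cases hL : xs[l.toNat] = t
      · simp only [if_pos hL]
        rw [if_neg (show ¬ l = -1 by omega)]
      · simp only [if_neg hL]
        by_cases hR : xs[r.toNat] = t
        · simp only [if_pos hR]
          rw [if_neg (show ¬ r = -1 by omega)]
        · simp only [if_neg hR]
          have e2 : r + 1 - 1 = (r - 1) + 1 := by ring
          rw [e2]
          exact ih (l + 1) (r - 1) (by omega) (by omega) (by omega)
    · have hx : searchLoop xs t l r = -1 := by rw [searchLoop]; rw [dif_neg hlr]
      have hy : searchLoop (a :: (xs ++ [b])) t (l + 1) (r + 1) = -1 := by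
        rw [searchLoop]; rw [dif_neg (show ¬ l + 1 ≤ r + 1 by omega)]
      rw [hx, hy]; norm_num

theorem searchA_cons_append (a b t : Int) (l : List Int) :
    search (a :: (l ++ [b])) t =
      if a = t then 0
      else if b = t then (l.length : Int) + 1
      else if search l t = -1 then -1 else search l t + 1 := by
  rw [search, searchLoop]
  have hlen : ((a :: (l ++ [b])).length : Int) - 1 = (l.length : Int) + 1 := by
    push_cast [List.length_cons, List.length_append, List.length_nil]; ring
  rw [hlen]
  simp only [dif_pos (show (0 : Int) ≤ (l.length : Int) + 1 by positivity)]
  rw [PySem.List.pyGet?_zero_cons]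
  have hb : PySem.List.pyGet? (a :: (l ++ [b])) ((l.length : Int) + 1) = some b := by
    have : a :: (l ++ [b]) = (a :: l) ++ [b] := by simp
    rw [this]
    have hcast : ((l.length : Int) + 1) = (((a :: l).length : Nat) : Int) := by simp
    rw [hcast]
    simpa using PySem.List.pyGet?_append_length (a :: l) b []
  rw [hb]
  by_cases ha : a = t
  · simp [ha]
  · have ha' : ¬ (some a = some t) := by simpa using ha
    simp only [if_neg ha']
    by_cases hbt : b = t
    · simp [hbt, ha]
    · have hb' : ¬ (some b = some t) := by simpa using hbt
      simp only [if_neg hb']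
      simp only [if_neg ha, if_neg hbt]
      have hshift := searchLoop_shift l a b t ((l.length : Int) - 0 + 1).toNat 0 ((l.length : Int) - 1)
        (by omega) (by omega) (by omega)
      rw [search]
      calc searchLoop (a :: (l ++ [b])) t (0 + 1) ((l.length : Int) + 1 - 1)
          = searchLoop (a :: (l ++ [b])) t (0 + 1) (((l.length : Int) - 1) + 1) := by ring_nf
        _ = _ := hshift

-- ---- B side: the same recurrence for `search_alt` under Pre_ ----

theorem searchB_nil (t : Int) : search_alt [] t = -1 := by
  simp [search_alt, PySem.List.index?]

theorem searchB_single (a t : Int) : search_alt [a] t = if a = t then 0 else -1 := by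
  by_cases h : a = t
  · rw [search_alt, h, PySem.List.index?_cons_self]; simp [h]
  · rw [search_alt, PySem.List.index?_cons_of_ne _ h]
    have : PySem.List.index? ([] : List Int) t = none := by simp [PySem.List.index?]
    rw [this]; simp [h]

theorem searchB_cons_append (a b t : Int) (l : List Int)
    (hcount : (a :: (l ++ [b])).count t ≤ 1) :
    search_alt (a :: (l ++ [b])) t =
      if a = t then 0
      else if b = t then (l.length : Int) + 1
      else if search_alt l t = -1 then -1 else search_alt l t + 1 := by
  by_cases ha : a = t
  · rw [search_alt, ha, PySem.List.index?_cons_self]; simp [ha]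
  · rw [search_alt, PySem.List.index?_cons_of_ne _ ha]
    by_cases hbt : b = t
    · -- t ∉ l because count ≤ 1 and b = t contributes one occurrence
      have hnl : t ∉ l := by
        intro hmem
        have h1 : 1 ≤ l.count t := List.one_le_count_iff.mpr hmem
        simp [List.count_cons, List.count_append, ha, hbt] at hcount
        omega
      rw [hbt, PySem.List.index?_append_singleton_self l t hnl]
      simp [ha, hbt]
    · by_cases hml : t ∈ l
      · obtain ⟨k, hk⟩ := Option.isSome_iff_exists.mp
          ((PySem.List.index?_isSome_iff l t).mpr hml)
        rw [PySem.List.index?_append_of_mem [b] hml, hk]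
        have hBl : search_alt l t = (k : Int) := by rw [search_alt, hk]
        simp only [if_neg ha, if_neg hbt, hBl]
        rw [if_neg (show ¬ ((k : Nat) : Int) = -1 by omega)]
        simp
      · have hnone : PySem.List.index? (l ++ [b]) t = none := by
          refine (PySem.List.index?_eq_none_iff _ t).mpr ?_
          intro h
          rcases List.mem_append.mp h with h | h
          · exact hml h
          · simp only [List.mem_singleton] at h
            exact hbt h.symm
        rw [hnone]
        have hBl : search_alt l t = -1 := by
          rw [search_alt, (PySem.List.index?_eq_none_iff l t).mpr hml]
        simp [ha, hbt, hBl]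

-- ---- main equivalence ----

theorem search_eq_alt (nums : List Int) (t : Int) (hc : nums.count t ≤ 1) :
    search nums t = search_alt nums t := by
  induction nums using List.bidirectionalRec with
  | nil => rw [searchA_nil, searchB_nil]
  | singleton a => rw [searchA_single, searchB_single]
  | cons_append a l b ih =>
    have hcl : l.count t ≤ 1 := by
      simp [List.count_cons, List.count_append] at hc ⊢
      omega
    rw [searchA_cons_append, searchB_cons_append a b t l hc, ih hcl]

-- ===== VERDICT (by name: the statement is the Claim_ definition above) =====
theorem search_spec : Claim_equal_search := by
  intro nums target _ hpre
  unfold Spec_search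
  exact search_eq_alt nums target hpre
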